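-- pv_equiv track=rewrite | github.com/KarthikRamesh9149/DataNarrate | datanarrate_server.py | determine_relevance
-- ===== SOURCE A (Python) =====
-- from typing import Optional, Dict, Any, List
--
-- def determine_relevance(chart_type: str, config: Dict, intent: str) -> tuple:
--     """Determine relevance of chart to user intent."""
--     intent_lower = intent.lower()
--
--     # Keywords for different relevance patterns
--     outcome_keywords = ['outcome', 'result', 'win', 'predict', 'factor', 'affect', 'impact', 'determine']
--     temporal_keywords = ['time', 'trend', 'over time', 'temporal', 'date', 'when']
--     quality_keywords = ['quality', 'missing', 'clean', 'data quality']
--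
--     is_outcome_focused = any(kw in intent_lower for kw in outcome_keywords)
--     is_temporal_focused = any(kw in intent_lower for kw in temporal_keywords)
--     is_quality_focused = any(kw in intent_lower for kw in quality_keywords)
--
--     # Determine relevance based on chart type and intent
--     if chart_type == "missing_values_bar":
--         if is_quality_focused:
--             return ("High", "Data quality is central to your analysis goal")
--         return ("Low", "Data quality overview, not directly addressing the main question")
--
--     elif chart_type == "correlation_heatmap":
--         if is_outcome_focused:
--             return ("High", "Shows relationships between features relevant to outcomes")
--         return ("Medium", "Useful for understanding feature relationships")
--
--     elif chart_type == "scatter":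
--         if is_outcome_focused:
--             return ("High", "Visualizes potential relationships between key variables")
--         return ("Medium", "Exploratory view of variable relationships")
--
--     elif chart_type == "grouped_bar":
--         if is_outcome_focused:
--             return ("High", "Compares metrics across categories relevant to outcomes")
--         return ("Medium", "Shows categorical comparisons")
--
--     elif chart_type == "time_trend":
--         if is_temporal_focused:
--             return ("High", "Directly addresses temporal analysis goal")
--         return ("Low", "Temporal view, may not directly address the question")
--
--     elif chart_type in ["numeric_distribution", "boxplot_outliers"]:
--         return ("Medium", "Provides context on data distribution and outliers")
--
--     elif chart_type == "categorical_frequency":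
--         return ("Medium", "Shows category distribution in the data")
--
--     return ("Medium", "Exploratory visualization")
-- ===== SOURCE B (Python) =====
-- # First-match decision list: one generic scan over ordered rule rows, keyword
-- # tests evaluated lazily only for the row under inspection (no precomputed flags).
--
-- _RULES = [
--     ("missing_values_bar", ['quality', 'missing', 'clean', 'data quality'],
--      ("High", "Data quality is central to your analysis goal")),
--     ("missing_values_bar", None,
--      ("Low", "Data quality overview, not directly addressing the main question")),
--     ("correlation_heatmap", ['outcome', 'result', 'win', 'predict', 'factor', 'affect', 'impact', 'determine'],
--      ("High", "Shows relationships between features relevant to outcomes")),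
--     ("correlation_heatmap", None,
--      ("Medium", "Useful for understanding feature relationships")),
--     ("scatter", ['outcome', 'result', 'win', 'predict', 'factor', 'affect', 'impact', 'determine'],
--      ("High", "Visualizes potential relationships between key variables")),
--     ("scatter", None,
--      ("Medium", "Exploratory view of variable relationships")),
--     ("grouped_bar", ['outcome', 'result', 'win', 'predict', 'factor', 'affect', 'impact', 'determine'],
--      ("High", "Compares metrics across categories relevant to outcomes")),
--     ("grouped_bar", None,
--      ("Medium", "Shows categorical comparisons")),
--     ("time_trend", ['time', 'trend', 'over time', 'temporal', 'date', 'when'],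
--      ("High", "Directly addresses temporal analysis goal")),
--     ("time_trend", None,
--      ("Low", "Temporal view, may not directly address the question")),
--     ("numeric_distribution", None,
--      ("Medium", "Provides context on data distribution and outliers")),
--     ("boxplot_outliers", None,
--      ("Medium", "Provides context on data distribution and outliers")),
--     ("categorical_frequency", None,
--      ("Medium", "Shows category distribution in the data")),
-- ]
--
--
-- def determine_relevance(chart_type, config, intent):
--     """Determine relevance of chart to user intent (first-match decision list)."""
--     intent_lower = intent.lower()
--     for ct, keywords, result in _RULES:
--         if ct == chart_type and (keywords is None
--                                  or any(kw in intent_lower for kw in keywords)):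
--             return result
--     return ("Medium", "Exploratory visualization")
-- ===== Notes on version B (the rewrite author's own statement) =====
-- stated objective: alternative
-- what changed: Replaces A's eight-branch if/elif chain with three eagerly precomputed intent flags by a flat ordered decision list scanned once for the first matching row, evaluating a row's keyword test lazily only when its chart_type matches.
import Mathlib
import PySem

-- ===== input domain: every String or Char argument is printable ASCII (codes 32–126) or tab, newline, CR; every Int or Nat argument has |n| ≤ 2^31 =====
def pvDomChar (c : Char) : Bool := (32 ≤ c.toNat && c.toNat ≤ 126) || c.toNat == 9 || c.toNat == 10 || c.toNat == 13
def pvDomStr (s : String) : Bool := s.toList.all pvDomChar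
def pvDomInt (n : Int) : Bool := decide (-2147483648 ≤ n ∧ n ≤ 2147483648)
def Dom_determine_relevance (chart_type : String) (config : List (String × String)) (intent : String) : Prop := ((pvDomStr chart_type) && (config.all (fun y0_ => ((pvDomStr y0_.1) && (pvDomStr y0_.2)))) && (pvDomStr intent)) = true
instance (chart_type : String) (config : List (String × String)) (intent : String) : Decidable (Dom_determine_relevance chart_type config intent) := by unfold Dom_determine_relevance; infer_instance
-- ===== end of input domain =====

-- B replaces A's if/elif chain with precomputed intent flags by a flat ordered decision
-- list scanned once for the first matching row, with lazy per-row keyword tests; objective: alternative.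

-- ===== PORT A =====
def determine_relevance (chart_type : String) (config : List (String × String)) (intent : String) : String × String :=
  let intent_lower := PySem.Str.lower intent
  let outcome_keywords : List String := ["outcome", "result", "win", "predict", "factor", "affect", "impact", "determine"]
  let temporal_keywords : List String := ["time", "trend", "over time", "temporal", "date", "when"]
  let quality_keywords : List String := ["quality", "missing", "clean", "data quality"]
  let is_outcome_focused := outcome_keywords.any (fun kw => PySem.Str.isIn kw intent_lower)
  let is_temporal_focused := temporal_keywords.any (fun kw => PySem.Str.isIn kw intent_lower)
  let is_quality_focused := quality_keywords.any (fun kw => PySem.Str.isIn kw intent_lower)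
  if chart_type == "missing_values_bar" then
    if is_quality_focused then ("High", "Data quality is central to your analysis goal")
    else ("Low", "Data quality overview, not directly addressing the main question")
  else if chart_type == "correlation_heatmap" then
    if is_outcome_focused then ("High", "Shows relationships between features relevant to outcomes")
    else ("Medium", "Useful for understanding feature relationships")
  else if chart_type == "scatter" then
    if is_outcome_focused then ("High", "Visualizes potential relationships between key variables")
    else ("Medium", "Exploratory view of variable relationships")
  else if chart_type == "grouped_bar" then
    if is_outcome_focused then ("High", "Compares metrics across categories relevant to outcomes")
    else ("Medium", "Shows categorical comparisons")
  else if chart_type == "time_trend" then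
    if is_temporal_focused then ("High", "Directly addresses temporal analysis goal")
    else ("Low", "Temporal view, may not directly address the question")
  else if ["numeric_distribution", "boxplot_outliers"].contains chart_type then
    ("Medium", "Provides context on data distribution and outliers")
  else if chart_type == "categorical_frequency" then
    ("Medium", "Shows category distribution in the data")
  else ("Medium", "Exploratory visualization")

-- ===== PORT B =====
-- the ordered decision list _RULES of Source B: (chart_type, optional keyword group, result)
def dr_rows : List (String × Option (List String) × (String × String)) :=
  [("missing_values_bar", some ["quality", "missing", "clean", "data quality"],
      ("High", "Data quality is central to your analysis goal")),
   ("missing_values_bar", none,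
      ("Low", "Data quality overview, not directly addressing the main question")),
   ("correlation_heatmap", some ["outcome", "result", "win", "predict", "factor", "affect", "impact", "determine"],
      ("High", "Shows relationships between features relevant to outcomes")),
   ("correlation_heatmap", none,
      ("Medium", "Useful for understanding feature relationships")),
   ("scatter", some ["outcome", "result", "win", "predict", "factor", "affect", "impact", "determine"],
      ("High", "Visualizes potential relationships between key variables")),
   ("scatter", none,
      ("Medium", "Exploratory view of variable relationships")),
   ("grouped_bar", some ["outcome", "result", "win", "predict", "factor", "affect", "impact", "determine"],
      ("High", "Compares metrics across categories relevant to outcomes")),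
   ("grouped_bar", none,
      ("Medium", "Shows categorical comparisons")),
   ("time_trend", some ["time", "trend", "over time", "temporal", "date", "when"],
      ("High", "Directly addresses temporal analysis goal")),
   ("time_trend", none,
      ("Low", "Temporal view, may not directly address the question")),
   ("numeric_distribution", none,
      ("Medium", "Provides context on data distribution and outliers")),
   ("boxplot_outliers", none,
      ("Medium", "Provides context on data distribution and outliers")),
   ("categorical_frequency", none,
      ("Medium", "Shows category distribution in the data"))]

-- the 'for … return' loop of Source B = first row whose chart_type and (lazy) keyword test match
def determine_relevance_alt (chart_type : String) (config : List (String × String)) (intent : String) : String × String :=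
  let intent_lower := PySem.Str.lower intent
  match dr_rows.find? (fun row =>
      row.1 == chart_type &&
        (match row.2.1 with
         | none => true
         | some kws => kws.any (fun kw => PySem.Str.isIn kw intent_lower))) with
  | some row => row.2.2
  | none => ("Medium", "Exploratory visualization")

-- ===== PRECONDITION & SPEC =====
def Spec_determine_relevance (chart_type : String) (config : List (String × String)) (intent : String) (out : String × String) : Prop := out = determine_relevance_alt chart_type config intent
instance (chart_type : String) (config : List (String × String)) (intent : String) (out : String × String) : Decidable (Spec_determine_relevance chart_type config intent out) := by unfold Spec_determine_relevance; infer_instance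

-- ===== CLAIM (what is proved, stated in full; the proofs are below) =====
def Claim_equal_determine_relevance : Prop := ∀ (chart_type : String) (config : List (String × String)) (intent : String), Dom_determine_relevance chart_type config intent → Spec_determine_relevance chart_type config intent (determine_relevance chart_type config intent)

-- ===== LEMMAS AND PROOFS =====

-- ===== VERDICT (by name: the statement is the Claim_ definition above) =====
set_option maxHeartbeats 4000000 in
theorem determine_relevance_spec : Claim_equal_determine_relevance := by
  intro ct config intent _
  unfold Spec_determine_relevance determine_relevance determine_relevance_alt dr_rows
  by_cases h1 : ct = "missing_values_bar"
  · subst h1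
    cases hb : (["quality", "missing", "clean", "data quality"] : List String).any (fun kw => PySem.Str.isIn kw (PySem.Str.lower intent)) with
    | false =>
        simp [List.any_cons, List.any_nil] at hb
        obtain ⟨c0, c1, c2, c3⟩ := hb
        simp [List.find?, c0, c1, c2, c3]
    | true =>
        simp [List.any_cons, List.any_nil] at hb
        rcases hb with h|h|h|h <;> simp [List.find?, h]
  · by_cases h2 : ct = "correlation_heatmap"
    · subst h2
      cases hb : (["outcome", "result", "win", "predict", "factor", "affect", "impact", "determine"] : List String).any (fun kw => PySem.Str.isIn kw (PySem.Str.lower intent)) with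
      | false =>
          simp [List.any_cons, List.any_nil] at hb
          obtain ⟨c0, c1, c2, c3, c4, c5, c6, c7⟩ := hb
          simp [List.find?, c0, c1, c2, c3, c4, c5, c6, c7]
      | true =>
          simp [List.any_cons, List.any_nil] at hb
          rcases hb with h|h|h|h|h|h|h|h <;> simp [List.find?, h]
    · by_cases h3 : ct = "scatter"
      · subst h3
        cases hb : (["outcome", "result", "win", "predict", "factor", "affect", "impact", "determine"] : List String).any (fun kw => PySem.Str.isIn kw (PySem.Str.lower intent)) with
        | false =>
            simp [List.any_cons, List.any_nil] at hb
            obtain ⟨c0, c1, c2, c3, c4, c5, c6, c7⟩ := hb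
            simp [List.find?, c0, c1, c2, c3, c4, c5, c6, c7]
        | true =>
            simp [List.any_cons, List.any_nil] at hb
            rcases hb with h|h|h|h|h|h|h|h <;> simp [List.find?, h]
      · by_cases h4 : ct = "grouped_bar"
        · subst h4
          cases hb : (["outcome", "result", "win", "predict", "factor", "affect", "impact", "determine"] : List String).any (fun kw => PySem.Str.isIn kw (PySem.Str.lower intent)) with
          | false =>
              simp [List.any_cons, List.any_nil] at hb
              obtain ⟨c0, c1, c2, c3, c4, c5, c6, c7⟩ := hb
              simp [List.find?, c0, c1, c2, c3, c4, c5, c6, c7]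
          | true =>
              simp [List.any_cons, List.any_nil] at hb
              rcases hb with h|h|h|h|h|h|h|h <;> simp [List.find?, h]
        · by_cases h5 : ct = "time_trend"
          · subst h5
            cases hb : (["time", "trend", "over time", "temporal", "date", "when"] : List String).any (fun kw => PySem.Str.isIn kw (PySem.Str.lower intent)) with
            | false =>
                simp [List.any_cons, List.any_nil] at hb
                obtain ⟨c0, c1, c2, c3, c4, c5⟩ := hb
                simp [List.find?, c0, c1, c2, c3, c4, c5]
            | true =>
                simp [List.any_cons, List.any_nil] at hb
                rcases hb with h|h|h|h|h|h <;> simp [List.find?, h]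
          · by_cases h6 : ct = "numeric_distribution"
            · subst h6; simp [List.find?]
            · by_cases h7 : ct = "boxplot_outliers"
              · subst h7; simp [List.find?]
              · by_cases h8 : ct = "categorical_frequency"
                · subst h8; simp [List.find?]
                · have e1 : ("missing_values_bar" == ct) = false := beq_eq_false_iff_ne.mpr (fun h => h1 h.symm)
                  have e2 : ("correlation_heatmap" == ct) = false := beq_eq_false_iff_ne.mpr (fun h => h2 h.symm)
                  have e3 : ("scatter" == ct) = false := beq_eq_false_iff_ne.mpr (fun h => h3 h.symm)
                  have e4 : ("grouped_bar" == ct) = false := beq_eq_false_iff_ne.mpr (fun h => h4 h.symm)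
                  have e5 : ("time_trend" == ct) = false := beq_eq_false_iff_ne.mpr (fun h => h5 h.symm)
                  have e6 : ("numeric_distribution" == ct) = false := beq_eq_false_iff_ne.mpr (fun h => h6 h.symm)
                  have e7 : ("boxplot_outliers" == ct) = false := beq_eq_false_iff_ne.mpr (fun h => h7 h.symm)
                  have e8 : ("categorical_frequency" == ct) = false := beq_eq_false_iff_ne.mpr (fun h => h8 h.symm)
                  simp [List.find?, e1, e2, e3, e4, e5, e6, e7, e8, h1, h2, h3, h4, h5, h6, h7, h8]
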